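-- pv_equiv track=rewrite | github.com/tired-wired/Vanderlin | icons/roguetown/clothing/onmob/desleever.py | find_state_variants
-- ===== SOURCE A (Python) =====
-- def find_state_variants(states):
--     """Find base states and their r_, l_ variants"""
--     base_states = {}
--
--     for state_name in states:
--         # Skip variant states
--         if state_name.startswith('r_') or state_name.startswith('l_'):
--             continue
--
--         variants = {}
--
--         # Look for right variant
--         r_name = f'r_{state_name}'
--         if r_name in states:
--             variants['r'] = r_name
--
--         # Look for left variant
--         l_name = f'l_{state_name}'
--         if l_name in states:
--             variants['l'] = l_name
--
--         if variants:
--             base_states[state_name] = variants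
--
--     return base_states
-- ===== SOURCE B (Python) =====
-- def find_state_variants(states):
--     """Find base states and their r_, l_ variants"""
--     # Group-by join: one streaming pass files every state into a record under its
--     # base key (its suffix for r_/l_ states, itself otherwise) and remembers the
--     # order in which base states first appear; a second pass replays that order
--     # and assembles each entry from its record.  No candidate names are probed
--     # against the input: variant names are taken from the stream itself.
--     order = []
--     rec = {}  # base key -> [is_base, right_name, left_name]
--     for s in states:
--         if s.startswith('r_'):
--             rec.setdefault(s[2:], [False, None, None])[1] = s
--         elif s.startswith('l_'):
--             rec.setdefault(s[2:], [False, None, None])[2] = s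
--         else:
--             e = rec.setdefault(s, [False, None, None])
--             if not e[0]:
--                 e[0] = True
--                 order.append(s)
--     result = {}
--     for b in order:
--         _, r, l = rec[b]
--         variants = {}
--         if r is not None:
--             variants['r'] = r
--         if l is not None:
--             variants['l'] = l
--         if variants:
--             result[b] = variants
--     return result
-- ===== Notes on version B (the rewrite author's own statement) =====
-- stated objective: faster
-- what changed: Replaces A's per-base scans of the whole list for constructed 'r_<s>'/'l_<s>' names by a single classifying group-by pass that files every state into a record keyed by its base name (variant names taken from the stream, never constructed and probed), followed by an ordered assembly pass over the first-seen base names.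
import Mathlib
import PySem

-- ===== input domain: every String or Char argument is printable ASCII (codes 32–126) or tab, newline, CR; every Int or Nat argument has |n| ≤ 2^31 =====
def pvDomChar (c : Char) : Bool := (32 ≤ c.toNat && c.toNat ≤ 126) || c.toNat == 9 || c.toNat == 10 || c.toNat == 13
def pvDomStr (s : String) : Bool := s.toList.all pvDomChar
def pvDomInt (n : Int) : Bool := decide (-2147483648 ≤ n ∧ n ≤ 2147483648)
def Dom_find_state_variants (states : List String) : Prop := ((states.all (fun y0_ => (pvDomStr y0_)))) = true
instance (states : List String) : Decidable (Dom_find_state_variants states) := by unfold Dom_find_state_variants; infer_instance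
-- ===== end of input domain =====

-- B replaces A's per-base constructed-name membership scans by a one-pass group-by join
-- (records keyed by base name, filled from the stream) plus an ordered assembly pass;
-- objective: faster (no repeated scans of the input list).

-- ===== PORT A =====
-- literal transliteration of the Python A: for each non-variant state, probe the whole
-- list for the constructed names 'r_<s>' / 'l_<s>' and insert the nonempty variant dict.
def find_state_variants (states : List String) : List (String × List (String × String)) :=
  (states.foldl
    (fun (base_states : PySem.Dict String (PySem.Dict String String)) state_name =>
      if PySem.Str.startswith state_name "r_" || PySem.Str.startswith state_name "l_" then
        base_states
      else
        let variants : PySem.Dict String String := PySem.Dict.empty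
        let r_name := "r_" ++ state_name
        let variants := if states.contains r_name then variants.insert "r" r_name else variants
        let l_name := "l_" ++ state_name
        let variants := if states.contains l_name then variants.insert "l" l_name else variants
        if variants.items.isEmpty then base_states
        else base_states.insert state_name variants)
    PySem.Dict.empty).items.map (fun p => (p.1, p.2.items))

-- ===== PORT B =====
-- literal transliteration of Source B: classify-and-join pass building rec/order, then assembly.
def find_state_variants_alt (states : List String) : List (String × List (String × String)) :=
  let st := states.foldl
    (fun (acc : List String × PySem.Dict String (Bool × Option String × Option String)) s =>
      let order := acc.1
      let rec_ := acc.2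
      if PySem.Str.startswith s "r_" then
        let e := rec_.getD (PySem.Str.slice s (some 2) none) (false, none, none)
        (order, rec_.insert (PySem.Str.slice s (some 2) none) (e.1, some s, e.2.2))
      else if PySem.Str.startswith s "l_" then
        let e := rec_.getD (PySem.Str.slice s (some 2) none) (false, none, none)
        (order, rec_.insert (PySem.Str.slice s (some 2) none) (e.1, e.2.1, some s))
      else
        let e := rec_.getD s (false, none, none)
        if e.1 then acc
        else (order ++ [s], rec_.insert s (true, e.2.1, e.2.2)))
    ([], PySem.Dict.empty)
  (st.1.foldl
    (fun (result : PySem.Dict String (PySem.Dict String String)) b =>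
      let e := st.2.getD b (false, none, none)
      let variants : PySem.Dict String String := PySem.Dict.empty
      let variants := match e.2.1 with
        | some r => variants.insert "r" r
        | none => variants
      let variants := match e.2.2 with
        | some l => variants.insert "l" l
        | none => variants
      if variants.items.isEmpty then result else result.insert b variants)
    PySem.Dict.empty).items.map (fun p => (p.1, p.2.items))

-- ===== PRECONDITION & SPEC =====
def Spec_find_state_variants (states : List String) (out : List (String × List (String × String))) : Prop := out = find_state_variants_alt states
instance (states : List String) (out : List (String × List (String × String))) : Decidable (Spec_find_state_variants states out) := by unfold Spec_find_state_variants; infer_instance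

-- ===== CLAIM (what is proved, stated in full; the proofs are below) =====
def Claim_equal_find_state_variants : Prop := ∀ (states : List String), Dom_find_state_variants states → Spec_find_state_variants states (find_state_variants states)

-- ===== LEMMAS AND PROOFS =====

-- is s a variant name (r_/l_ prefixed)?
def pvIsVar (s : String) : Bool :=
  PySem.Str.startswith s "r_" || PySem.Str.startswith s "l_"

-- the inner variants dict A builds for base b (both ports are proved against it)
def pvVB (states : List String) (b : String) : PySem.Dict String String :=
  let v : PySem.Dict String String := PySem.Dict.empty
  let v := if states.contains ("r_" ++ b) then v.insert "r" ("r_" ++ b) else v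
  if states.contains ("l_" ++ b) then v.insert "l" ("l_" ++ b) else v

-- first occurrences of elements not yet "seen" (seen given as a predicate, updated as we emit)
def pvFon (q : String → Bool) : List String → List String
  | [] => []
  | x :: xs => if q x then pvFon q xs else x :: pvFon (fun y => y == x || q y) xs

theorem pvFon_congr (q q' : String → Bool) (h : ∀ y, q y = q' y) (l : List String) :
    pvFon q l = pvFon q' l := by
  have : q = q' := funext h
  rw [this]

-- string facts -------------------------------------------------------------

theorem pv_startswith_append (p b : String) :
    PySem.Str.startswith (p ++ b) p = true := by
  simp [PySem.Str.startswith_eq, PySem.Chars.startswith, List.isPrefixOf_iff_prefix]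

theorem pv_toList_rb (b : String) : ("r_" ++ b).toList = 'r' :: '_' :: b.toList := by
  simp [String.toList_append]

theorem pv_toList_lb (b : String) : ("l_" ++ b).toList = 'l' :: '_' :: b.toList := by
  simp [String.toList_append]

theorem pv_rb_ne_lb (b b' : String) : ("r_" ++ b) ≠ ("l_" ++ b') := by
  intro h
  have := congrArg String.toList h
  rw [pv_toList_rb, pv_toList_lb] at this
  simp at this

theorem pv_rb_inj (b b' : String) : ("r_" ++ b) = ("r_" ++ b') ↔ b = b' := by
  constructor
  · intro h
    have := congrArg String.toList h
    rw [pv_toList_rb, pv_toList_rb] at this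
    simp at this
    exact String.toList_inj.mp this
  · intro h; rw [h]

theorem pv_lb_inj (b b' : String) : ("l_" ++ b) = ("l_" ++ b') ↔ b = b' := by
  constructor
  · intro h
    have := congrArg String.toList h
    rw [pv_toList_lb, pv_toList_lb] at this
    simp at this
    exact String.toList_inj.mp this
  · intro h; rw [h]

-- s with startswith s "r_": s = "r_" ++ s[2:]
theorem pv_r_decomp (s : String) (h : PySem.Str.startswith s "r_" = true) :
    "r_" ++ PySem.Str.slice s (some 2) none = s := by
  have h' : ['r','_'] <+: s.toList := by
    simpa [PySem.Str.startswith_eq, PySem.Chars.startswith, List.isPrefixOf_iff_prefix] using h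
  rcases h' with ⟨t, ht⟩
  have hs : s.toList = 'r' :: '_' :: t := by simpa using ht.symm
  apply String.toList_inj.mp
  rw [String.toList_append]
  have hsl : (PySem.Str.slice s (some 2) none).toList = s.toList.drop 2 := by
    rw [PySem.Str.toList_slice]
    simpa using PySem.List.slice_from_natCast (a := 2) (xs := s.toList)
  rw [hsl, hs]
  rfl

theorem pv_l_decomp (s : String) (h : PySem.Str.startswith s "l_" = true) :
    "l_" ++ PySem.Str.slice s (some 2) none = s := by
  have h' : ['l','_'] <+: s.toList := by
    simpa [PySem.Str.startswith_eq, PySem.Chars.startswith, List.isPrefixOf_iff_prefix] using h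
  rcases h' with ⟨t, ht⟩
  have hs : s.toList = 'l' :: '_' :: t := by simpa using ht.symm
  apply String.toList_inj.mp
  rw [String.toList_append]
  have hsl : (PySem.Str.slice s (some 2) none).toList = s.toList.drop 2 := by
    rw [PySem.Str.toList_slice]
    simpa using PySem.List.slice_from_natCast (a := 2) (xs := s.toList)
  rw [hsl, hs]
  rfl


-- step functions (definitional copies of the two ports' fold bodies) ------------------

def pvStepA (states : List String) (base_states : PySem.Dict String (PySem.Dict String String))
    (state_name : String) : PySem.Dict String (PySem.Dict String String) :=
  if pvIsVar state_name then base_states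
  else if (pvVB states state_name).items.isEmpty then base_states
  else base_states.insert state_name (pvVB states state_name)

def pvStepB (acc : List String × PySem.Dict String (Bool × Option String × Option String))
    (s : String) : List String × PySem.Dict String (Bool × Option String × Option String) :=
  let order := acc.1
  let rec_ := acc.2
  if PySem.Str.startswith s "r_" then
    let e := rec_.getD (PySem.Str.slice s (some 2) none) (false, none, none)
    (order, rec_.insert (PySem.Str.slice s (some 2) none) (e.1, some s, e.2.2))
  else if PySem.Str.startswith s "l_" then
    let e := rec_.getD (PySem.Str.slice s (some 2) none) (false, none, none)
    (order, rec_.insert (PySem.Str.slice s (some 2) none) (e.1, e.2.1, some s))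
  else
    let e := rec_.getD s (false, none, none)
    if e.1 then acc
    else (order ++ [s], rec_.insert s (true, e.2.1, e.2.2))

def pvAsmVar (e : Bool × Option String × Option String) : PySem.Dict String String :=
  let variants : PySem.Dict String String := PySem.Dict.empty
  let variants := match e.2.1 with
    | some r => variants.insert "r" r
    | none => variants
  match e.2.2 with
    | some l => variants.insert "l" l
    | none => variants

def pvAsmStep (rec_ : PySem.Dict String (Bool × Option String × Option String))
    (result : PySem.Dict String (PySem.Dict String String)) (b : String) :
    PySem.Dict String (PySem.Dict String String) :=
  if (pvAsmVar (rec_.getD b (false, none, none))).items.isEmpty then result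
  else result.insert b (pvAsmVar (rec_.getD b (false, none, none)))

theorem pvA_eq (states : List String) :
    find_state_variants states
      = (states.foldl (pvStepA states) PySem.Dict.empty).items.map (fun p => (p.1, p.2.items)) := rfl

theorem pvB_eq (states : List String) :
    find_state_variants_alt states
      = ((states.foldl pvStepB ([], PySem.Dict.empty)).1.foldl
          (pvAsmStep (states.foldl pvStepB ([], PySem.Dict.empty)).2) PySem.Dict.empty).items.map
            (fun p => (p.1, p.2.items)) := rfl

-- A-side fold characterisation ---------------------------------------------------------

theorem pvA_fold (states : List String) (l : List String) :
    ∀ (acc : PySem.Dict String (PySem.Dict String String)),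
      acc.keys.Nodup → (∀ p ∈ acc.items, p.2 = pvVB states p.1) →
      (l.foldl (pvStepA states) acc).items
        = acc.items
            ++ (pvFon (fun x => pvIsVar x || ((pvVB states x).items.isEmpty || acc.contains x)) l).map
                (fun b => (b, pvVB states b)) := by
  induction l with
  | nil => intro acc _ _; simp [pvFon]
  | cons s rest ih =>
    intro acc hnd hval
    rw [List.foldl_cons]
    by_cases hv : pvIsVar s = true
    · have hstep : pvStepA states acc s = acc := by simp [pvStepA, hv]
      rw [hstep, ih acc hnd hval]
      simp [pvFon, hv]
    · replace hv : pvIsVar s = false := by simpa using hv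
      by_cases he : (pvVB states s).items.isEmpty = true
      · have hstep : pvStepA states acc s = acc := by simp [pvStepA, hv, he]
        rw [hstep, ih acc hnd hval]
        simp [pvFon, hv, he]
      · replace he : (pvVB states s).items.isEmpty = false := by simpa using he
        by_cases hc : acc.contains s = true
        · have heq : acc.insert s (pvVB states s) = acc := by
            apply PySem.Dict.ext
            rw [PySem.Dict.items_insert_of_contains acc (pvVB states s) hc]
            have hid : ∀ p ∈ acc.items, (if p.1 == s then (s, pvVB states s) else p) = p := by
              intro p hp
              by_cases h1 : p.1 = s
              · simp [h1]
                rw [← h1, ← hval p hp]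
              · simp [h1]
            rw [List.map_congr_left hid]
            simp
          have hstep : pvStepA states acc s = acc := by
            simp [pvStepA, hv, he, heq]
          rw [hstep, ih acc hnd hval]
          simp [pvFon, hv, he, hc]
        · replace hc : acc.contains s = false := by simpa using hc
          have hstep : pvStepA states acc s = acc.insert s (pvVB states s) := by
            simp [pvStepA, hv, he]
          rw [hstep]
          have hnd' : (acc.insert s (pvVB states s)).keys.Nodup :=
            PySem.Dict.nodup_keys_insert _ _ _ hnd
          have hval' : ∀ p ∈ (acc.insert s (pvVB states s)).items, p.2 = pvVB states p.1 := by
            intro p hp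
            rw [PySem.Dict.mem_items_insert] at hp
            rcases hp with h | ⟨h, _⟩
            · subst h; rfl
            · exact hval p h
          rw [ih _ hnd' hval']
          rw [PySem.Dict.items_insert_of_not_contains acc (pvVB states s) hc]
          have hfon : pvFon (fun x => pvIsVar x || ((pvVB states x).items.isEmpty
                || (acc.insert s (pvVB states s)).contains x)) rest
              = pvFon (fun y => (y == s)
                || (pvIsVar y || ((pvVB states y).items.isEmpty || acc.contains y))) rest := by
            apply pvFon_congr
            intro y
            rw [PySem.Dict.contains_insert]
            cases pvIsVar y <;> cases (pvVB states y).items.isEmpty <;>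
              cases hys : (y == s) <;> cases acc.contains y <;> simp
          rw [hfon]
          have hfon2 : pvFon (fun x => pvIsVar x || ((pvVB states x).items.isEmpty
                || acc.contains x)) (s :: rest)
              = s :: pvFon (fun y => (y == s)
                || (pvIsVar y || ((pvVB states y).items.isEmpty || acc.contains y))) rest := by
            simp [pvFon, hv, he, hc]
          rw [hfon2]
          simp

-- B-side classify-fold characterisation ------------------------------------------------

theorem pvB_r (l : List String) :
    ∀ (acc : List String × PySem.Dict String (Bool × Option String × Option String)) (b : String),
      ((l.foldl pvStepB acc).2.getD b (false, none, none)).2.1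
        = (if l.contains ("r_" ++ b) then some ("r_" ++ b)
           else (acc.2.getD b (false, none, none)).2.1) := by
  induction l with
  | nil => intro acc b; simp
  | cons s rest ih =>
    intro acc b
    rw [List.foldl_cons]
    by_cases hr : PySem.Str.startswith s "r_" = true
    · have hk : "r_" ++ PySem.Str.slice s (some 2) none = s := pv_r_decomp s hr
      have hstep : pvStepB acc s
          = (acc.1, acc.2.insert (PySem.Str.slice s (some 2) none)
              ((acc.2.getD (PySem.Str.slice s (some 2) none) (false, none, none)).1, some s,
               (acc.2.getD (PySem.Str.slice s (some 2) none) (false, none, none)).2.2)) := by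
        simp only [pvStepB]
        rw [hr]
        simp
      rw [hstep, ih, PySem.Dict.getD_insert]
      by_cases hb : b = PySem.Str.slice s (some 2) none
      · simp [List.contains_cons, hb, hk]
      · have hne : ("r_" ++ b) ≠ s := by
          rw [← hk]
          intro h
          exact hb ((pv_rb_inj _ _).mp h)
        simp [List.contains_cons, hb, hne]
    · replace hr : PySem.Str.startswith s "r_" = false := by simpa using hr
      by_cases hl : PySem.Str.startswith s "l_" = true
      · have hk : "l_" ++ PySem.Str.slice s (some 2) none = s := pv_l_decomp s hl
        have hstep : pvStepB acc s
            = (acc.1, acc.2.insert (PySem.Str.slice s (some 2) none)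
                ((acc.2.getD (PySem.Str.slice s (some 2) none) (false, none, none)).1,
                 (acc.2.getD (PySem.Str.slice s (some 2) none) (false, none, none)).2.1, some s)) := by
          simp only [pvStepB]
          rw [hr, hl]
          simp
        rw [hstep, ih, PySem.Dict.getD_insert]
        have hne : ("r_" ++ b) ≠ s := by
          rw [← hk]
          exact pv_rb_ne_lb b (PySem.Str.slice s (some 2) none)
        by_cases hb : b = PySem.Str.slice s (some 2) none
        · rw [hb] at hne
          simp [List.contains_cons, hne, hb]
        · simp [hb, List.contains_cons, hne]
      · replace hl : PySem.Str.startswith s "l_" = false := by simpa using hl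
        have hne : ("r_" ++ b) ≠ s := by
          intro h
          rw [← h, pv_startswith_append "r_" b] at hr
          simp at hr
        by_cases hf : (acc.2.getD s (false, none, none)).1 = true
        · have hstep : pvStepB acc s = acc := by
            simp only [pvStepB]
            rw [hr, hl, hf]
            simp
          rw [hstep, ih]
          simp [List.contains_cons, hne]
        · replace hf : (acc.2.getD s (false, none, none)).1 = false := by simpa using hf
          have hstep : pvStepB acc s
              = (acc.1 ++ [s], acc.2.insert s (true,
                  (acc.2.getD s (false, none, none)).2.1,
                  (acc.2.getD s (false, none, none)).2.2)) := by
            simp only [pvStepB]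
            rw [hr, hl, hf]
            simp
          rw [hstep, ih, PySem.Dict.getD_insert]
          by_cases hb : b = s
          · simp [hb, List.contains_cons, hne]
          · simp [hb, List.contains_cons, hne]

theorem pvB_l (l : List String) :
    ∀ (acc : List String × PySem.Dict String (Bool × Option String × Option String)) (b : String),
      ((l.foldl pvStepB acc).2.getD b (false, none, none)).2.2
        = (if l.contains ("l_" ++ b) then some ("l_" ++ b)
           else (acc.2.getD b (false, none, none)).2.2) := by
  induction l with
  | nil => intro acc b; simp
  | cons s rest ih =>
    intro acc b
    rw [List.foldl_cons]
    by_cases hr : PySem.Str.startswith s "r_" = true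
    · have hk : "r_" ++ PySem.Str.slice s (some 2) none = s := pv_r_decomp s hr
      have hstep : pvStepB acc s
          = (acc.1, acc.2.insert (PySem.Str.slice s (some 2) none)
              ((acc.2.getD (PySem.Str.slice s (some 2) none) (false, none, none)).1, some s,
               (acc.2.getD (PySem.Str.slice s (some 2) none) (false, none, none)).2.2)) := by
        simp only [pvStepB]
        rw [hr]
        simp
      rw [hstep, ih, PySem.Dict.getD_insert]
      have hne : ("l_" ++ b) ≠ s := by
        rw [← hk]
        intro h
        exact pv_rb_ne_lb (PySem.Str.slice s (some 2) none) b h.symm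
      by_cases hb : b = PySem.Str.slice s (some 2) none
      · rw [hb] at hne
        simp [List.contains_cons, hne, hb]
      · simp [hb, List.contains_cons, hne]
    · replace hr : PySem.Str.startswith s "r_" = false := by simpa using hr
      by_cases hl : PySem.Str.startswith s "l_" = true
      · have hk : "l_" ++ PySem.Str.slice s (some 2) none = s := pv_l_decomp s hl
        have hstep : pvStepB acc s
            = (acc.1, acc.2.insert (PySem.Str.slice s (some 2) none)
                ((acc.2.getD (PySem.Str.slice s (some 2) none) (false, none, none)).1,
                 (acc.2.getD (PySem.Str.slice s (some 2) none) (false, none, none)).2.1, some s)) := by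
          simp only [pvStepB]
          rw [hr, hl]
          simp
        rw [hstep, ih, PySem.Dict.getD_insert]
        by_cases hb : b = PySem.Str.slice s (some 2) none
        · simp [List.contains_cons, hb, hk]
        · have hne : ("l_" ++ b) ≠ s := by
            rw [← hk]
            intro h
            exact hb ((pv_lb_inj _ _).mp h)
          simp [List.contains_cons, hb, hne]
      · replace hl : PySem.Str.startswith s "l_" = false := by simpa using hl
        have hne : ("l_" ++ b) ≠ s := by
          intro h
          rw [← h, pv_startswith_append "l_" b] at hl
          simp at hl
        by_cases hf : (acc.2.getD s (false, none, none)).1 = true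
        · have hstep : pvStepB acc s = acc := by
            simp only [pvStepB]
            rw [hr, hl, hf]
            simp
          rw [hstep, ih]
          simp [List.contains_cons, hne]
        · replace hf : (acc.2.getD s (false, none, none)).1 = false := by simpa using hf
          have hstep : pvStepB acc s
              = (acc.1 ++ [s], acc.2.insert s (true,
                  (acc.2.getD s (false, none, none)).2.1,
                  (acc.2.getD s (false, none, none)).2.2)) := by
            simp only [pvStepB]
            rw [hr, hl, hf]
            simp
          rw [hstep, ih, PySem.Dict.getD_insert]
          by_cases hb : b = s
          · simp [hb, List.contains_cons, hne]
          · simp [hb, List.contains_cons, hne]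

theorem pvB_order (l : List String) :
    ∀ (acc : List String × PySem.Dict String (Bool × Option String × Option String)),
      (l.foldl pvStepB acc).1
        = acc.1 ++ pvFon (fun x => pvIsVar x || (acc.2.getD x (false, none, none)).1) l := by
  induction l with
  | nil => intro acc; simp [pvFon]
  | cons s rest ih =>
    intro acc
    rw [List.foldl_cons]
    by_cases hr : PySem.Str.startswith s "r_" = true
    · have hvs : pvIsVar s = true := by unfold pvIsVar; rw [hr]; simp
      have hstep : pvStepB acc s
          = (acc.1, acc.2.insert (PySem.Str.slice s (some 2) none)
              ((acc.2.getD (PySem.Str.slice s (some 2) none) (false, none, none)).1, some s,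
               (acc.2.getD (PySem.Str.slice s (some 2) none) (false, none, none)).2.2)) := by
        simp only [pvStepB]
        rw [hr]
        simp
      rw [hstep, ih]
      have hcong : pvFon (fun x => pvIsVar x
            || ((acc.2.insert (PySem.Str.slice s (some 2) none)
              ((acc.2.getD (PySem.Str.slice s (some 2) none) (false, none, none)).1, some s,
               (acc.2.getD (PySem.Str.slice s (some 2) none) (false, none, none)).2.2)).getD x
                (false, none, none)).1) rest
          = pvFon (fun x => pvIsVar x || (acc.2.getD x (false, none, none)).1) rest := by
        apply pvFon_congr
        intro y
        rw [PySem.Dict.getD_insert]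
        by_cases hy : y = PySem.Str.slice s (some 2) none
        · simp [hy]
        · simp [hy]
      rw [hcong]
      simp [pvFon, hvs]
    · replace hr : PySem.Str.startswith s "r_" = false := by simpa using hr
      by_cases hl : PySem.Str.startswith s "l_" = true
      · have hvs : pvIsVar s = true := by unfold pvIsVar; rw [hl]; simp
        have hstep : pvStepB acc s
            = (acc.1, acc.2.insert (PySem.Str.slice s (some 2) none)
                ((acc.2.getD (PySem.Str.slice s (some 2) none) (false, none, none)).1,
                 (acc.2.getD (PySem.Str.slice s (some 2) none) (false, none, none)).2.1, some s)) := by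
          simp only [pvStepB]
          rw [hr, hl]
          simp
        rw [hstep, ih]
        have hcong : pvFon (fun x => pvIsVar x
              || ((acc.2.insert (PySem.Str.slice s (some 2) none)
                ((acc.2.getD (PySem.Str.slice s (some 2) none) (false, none, none)).1,
                 (acc.2.getD (PySem.Str.slice s (some 2) none) (false, none, none)).2.1, some s)).getD x
                  (false, none, none)).1) rest
            = pvFon (fun x => pvIsVar x || (acc.2.getD x (false, none, none)).1) rest := by
          apply pvFon_congr
          intro y
          rw [PySem.Dict.getD_insert]
          by_cases hy : y = PySem.Str.slice s (some 2) none
          · simp [hy]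
          · simp [hy]
        rw [hcong]
        simp [pvFon, hvs]
      · replace hl : PySem.Str.startswith s "l_" = false := by simpa using hl
        have hvs : pvIsVar s = false := by unfold pvIsVar; rw [hr, hl]; rfl
        by_cases hf : (acc.2.getD s (false, none, none)).1 = true
        · have hstep : pvStepB acc s = acc := by
            simp only [pvStepB]
            rw [hr, hl, hf]
            simp
          rw [hstep, ih]
          simp [pvFon, hvs, hf]
        · replace hf : (acc.2.getD s (false, none, none)).1 = false := by simpa using hf
          have hstep : pvStepB acc s
              = (acc.1 ++ [s], acc.2.insert s (true,
                  (acc.2.getD s (false, none, none)).2.1,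
                  (acc.2.getD s (false, none, none)).2.2)) := by
            simp only [pvStepB]
            rw [hr, hl, hf]
            simp
          rw [hstep, ih]
          have hcong : pvFon (fun x => pvIsVar x
                || ((acc.2.insert s (true,
                  (acc.2.getD s (false, none, none)).2.1,
                  (acc.2.getD s (false, none, none)).2.2)).getD x (false, none, none)).1) rest
              = pvFon (fun y => (y == s)
                || (pvIsVar y || (acc.2.getD y (false, none, none)).1)) rest := by
            apply pvFon_congr
            intro y
            rw [PySem.Dict.getD_insert]
            by_cases hy : y = s
            · simp [hy]
            · simp [hy]
          rw [hcong]
          have hfon2 : pvFon (fun x => pvIsVar x || (acc.2.getD x (false, none, none)).1) (s :: rest)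
              = s :: pvFon (fun y => (y == s)
                || (pvIsVar y || (acc.2.getD y (false, none, none)).1)) rest := by
            simp [pvFon, hvs, hf]
          rw [hfon2]
          simp

-- pvFon facts --------------------------------------------------------------------------

theorem pvFon_mem (l : List String) :
    ∀ (q : String → Bool) (x : String), x ∈ pvFon q l → q x = false := by
  induction l with
  | nil => intro q x h; simp [pvFon] at h
  | cons a t ih =>
    intro q x h
    by_cases hq : q a = true
    · simp [pvFon, hq] at h
      exact ih q x h
    · replace hq : q a = false := by simpa using hq
      simp [pvFon, hq] at h
      rcases h with h | h
      · rw [h]; exact hq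
      · have := ih _ x h
        simp at this
        exact this.2

theorem pvFon_nodup (l : List String) : ∀ (q : String → Bool), (pvFon q l).Nodup := by
  induction l with
  | nil => intro q; simp [pvFon]
  | cons a t ih =>
    intro q
    by_cases hq : q a = true
    · simp [pvFon, hq]
      exact ih q
    · replace hq : q a = false := by simpa using hq
      simp [pvFon, hq]
      constructor
      · intro hmem
        have := pvFon_mem t _ a hmem
        simp at this
      · exact ih _

theorem pvFon_or (l : List String) :
    ∀ (q c : String → Bool),
      pvFon (fun x => q x || c x) l = (pvFon q l).filter (fun x => !c x) := by
  induction l with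
  | nil => intro q c; simp [pvFon]
  | cons a t ih =>
    intro q c
    by_cases hq : q a = true
    · have h1 : (q a || c a) = true := by simp [hq]
      simp only [pvFon, hq, h1, if_true]
      exact ih q c
    · replace hq : q a = false := by simpa using hq
      by_cases hcc : c a = true
      · have h1 : (q a || c a) = true := by simp [hcc]
        simp only [pvFon, hq, h1, if_true, if_false]
        have hcong : pvFon (fun x => q x || c x) t
            = pvFon (fun x => ((x == a) || q x) || c x) t := by
          apply pvFon_congr
          intro y
          cases hy : (y == a)
          · simp [hy]
          · have hya : y = a := by simpa using hy
            simp [hya, hcc]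
        rw [hcong, ih (fun x => (x == a) || q x) c]
        simp [List.filter_cons, hcc]
      · replace hcc : c a = false := by simpa using hcc
        have h1 : (q a || c a) = false := by simp [hq, hcc]
        simp only [pvFon, hq, h1, if_false]
        simp [List.filter_cons, hcc]
        have hcong : pvFon (fun y => (y == a) || (q y || c y)) t
            = pvFon (fun x => ((x == a) || q x) || c x) t := by
          apply pvFon_congr
          intro y
          cases hy : (y == a) <;> simp
        rw [hcong, ih (fun x => (x == a) || q x) c]

-- assembly pass -------------------------------------------------------------------------

theorem pvAsmVar_eq (states : List String) (b : String) (e : Bool × Option String × Option String)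
    (h1 : e.2.1 = if states.contains ("r_" ++ b) then some ("r_" ++ b) else none)
    (h2 : e.2.2 = if states.contains ("l_" ++ b) then some ("l_" ++ b) else none) :
    pvAsmVar e = pvVB states b := by
  obtain ⟨fl, r?, l?⟩ := e
  simp only at h1 h2
  subst h1 h2
  by_cases hcr : ("r_" ++ b) ∈ states
  · by_cases hcl : ("l_" ++ b) ∈ states
    · simp [pvAsmVar, pvVB, hcr, hcl]
    · simp [pvAsmVar, pvVB, hcr, hcl]
  · by_cases hcl : ("l_" ++ b) ∈ states
    · simp [pvAsmVar, pvVB, hcr, hcl]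
    · simp [pvAsmVar, pvVB, hcr, hcl]

theorem pvAsm_fold (states : List String)
    (rec_ : PySem.Dict String (Bool × Option String × Option String))
    (hv : ∀ b, pvAsmVar (rec_.getD b (false, none, none)) = pvVB states b) :
    ∀ (o : List String) (result : PySem.Dict String (PySem.Dict String String)),
      o.Nodup → (∀ b ∈ o, result.contains b = false) →
      (o.foldl (pvAsmStep rec_) result).items
        = result.items ++ o.filterMap (fun b =>
            if (pvVB states b).items.isEmpty then none else some (b, pvVB states b)) := by
  intro o
  induction o with
  | nil => intro result _ _; simp
  | cons b t ih =>
    intro result hnd hcon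
    rw [List.foldl_cons]
    by_cases he : (pvVB states b).items.isEmpty = true
    · have he' : (pvVB states b).items = [] := by simpa using he
      have hstep : pvAsmStep rec_ result b = result := by
        simp [pvAsmStep, hv b, he]
      rw [hstep, ih result hnd.of_cons (fun x hx => hcon x (List.mem_cons_of_mem _ hx))]
      simp [List.filterMap_cons, he']
    · have he' : ¬ (pvVB states b).items = [] := by simpa using he
      replace he : (pvVB states b).items.isEmpty = false := by simpa using he'
      have hstep : pvAsmStep rec_ result b = result.insert b (pvVB states b) := by
        simp [pvAsmStep, hv b, he]
      rw [hstep]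
      have hcb : result.contains b = false := hcon b (List.mem_cons_self ..)
      have hcon' : ∀ x ∈ t, (result.insert b (pvVB states b)).contains x = false := by
        intro x hx
        rw [PySem.Dict.contains_insert]
        have hxb : x ≠ b := by
          intro h
          subst h
          exact (List.nodup_cons.mp hnd).1 hx
        simp [hxb]
        exact hcon x (List.mem_cons_of_mem _ hx)
      rw [ih _ hnd.of_cons hcon']
      rw [PySem.Dict.items_insert_of_not_contains result (pvVB states b) hcb]
      simp [List.filterMap_cons, he']

-- final bridge --------------------------------------------------------------------------

theorem pv_final_bridge (states : List String) (ys : List String) :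
    ((ys.filter (fun x => !(pvVB states x).items.isEmpty)).map
        (fun b => (b, pvVB states b))).map (fun p => (p.1, p.2.items))
      = (ys.filterMap (fun b =>
          if (pvVB states b).items.isEmpty then none
          else some (b, pvVB states b))).map (fun p => (p.1, p.2.items)) := by
  induction ys with
  | nil => simp
  | cons a t ih =>
    by_cases h : (pvVB states a).items = []
    · simp [List.filter_cons, List.filterMap_cons, h, ih]
    · simp [List.filter_cons, List.filterMap_cons, h, ih]

-- ===== VERDICT (by name: the statement is the Claim_ definition above) =====
theorem find_state_variants_spec : Claim_equal_find_state_variants := by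
  unfold Claim_equal_find_state_variants
  intro states _
  unfold Spec_find_state_variants
  rw [pvA_eq, pvB_eq]
  -- A side: characterise the fold
  have hA := pvA_fold states states PySem.Dict.empty
    (by simp [PySem.Dict.empty, PySem.Dict.keys]) (by simp [PySem.Dict.empty])
  rw [hA]
  have hAcong : pvFon (fun x => pvIsVar x
        || ((pvVB states x).items.isEmpty
            || (PySem.Dict.empty : PySem.Dict String (PySem.Dict String String)).contains x)) states
      = pvFon (fun x => pvIsVar x || (pvVB states x).items.isEmpty) states := by
    apply pvFon_congr
    intro y
    rw [PySem.Dict.contains_empty]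
    simp
  rw [hAcong, pvFon_or states pvIsVar (fun x => (pvVB states x).items.isEmpty)]
  -- B side: order and record characterisation, then the assembly pass
  have horder := pvB_order states ([], PySem.Dict.empty)
  have horder' : (states.foldl pvStepB ([], PySem.Dict.empty)).1
      = pvFon pvIsVar states := by
    rw [horder]
    simp
  have hv : ∀ b, pvAsmVar ((states.foldl pvStepB ([], PySem.Dict.empty)).2.getD b
      (false, none, none)) = pvVB states b := by
    intro b
    apply pvAsmVar_eq states b
    · rw [pvB_r states ([], PySem.Dict.empty) b]
      rw [PySem.Dict.getD_empty]
    · rw [pvB_l states ([], PySem.Dict.empty) b]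
      rw [PySem.Dict.getD_empty]
  rw [horder']
  rw [pvAsm_fold states _ hv (pvFon pvIsVar states) PySem.Dict.empty
      (pvFon_nodup states pvIsVar) (by intro x _; simp [PySem.Dict.empty])]
  have hfin := pv_final_bridge states (pvFon pvIsVar states)
  simpa [PySem.Dict.empty] using hfin
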